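-- pv_equiv track=rewrite | github.com/fredliu168/wxmp-draft-publisher | wxmp-draft-publisher/scripts/markdown_formatter.py | _normalize_blockquotes
-- ===== SOURCE A (Python) =====
-- def _normalize_blockquotes(lines: list) -> list:
--     """规范化引用块"""
--     result = []
--     in_blockquote = False
--
--     for line in lines:
--         stripped = line.strip()
--         if stripped.startswith('>'):
--             # 不在引用块中时，前面加空行
--             if not in_blockquote and result and result[-1].strip():
--                 result.append('')
--
--             content = stripped[1:].strip()
--             result.append('> ' + content)
--             in_blockquote = True
--         else:
--             # 非引用行
--             if in_blockquote and stripped: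
--                 result.append('')
--
--             result.append(line)
--             in_blockquote = False
--
--     return result
-- ===== SOURCE B (Python) =====
-- def _normalize_blockquotes(lines: list) -> list:
--     """Run-based rewrite: split lines into maximal runs of quote/non-quote
--     lines, then emit each run at once with the separating blank lines."""
--     out = []
--     prev_quote = False
--     i = 0
--     n = len(lines)
--     while i < n:
--         k = lines[i].strip().startswith('>')
--         j = i + 1
--         while j < n and lines[j].strip().startswith('>') == k:
--             j += 1
--         run = lines[i:j]
--         if k:
--             if out and out[-1].strip():
--                 out.append('')
--             out.extend('> ' + l.strip()[1:].strip() for l in run)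
--         else:
--             if prev_quote and lines[i].strip():
--                 out.append('')
--             out.extend(run)
--         prev_quote = k
--         i = j
--     return out
-- ===== Notes on version B (the rewrite author's own statement) =====
-- stated objective: alternative
-- what changed: Replaces A's per-line in_blockquote flag with an explicit traversal over maximal runs of consecutive quote/non-quote lines: each run is located with an inner scan and emitted at once (mapped for quote runs, verbatim otherwise), with the separating blank lines decided at run boundaries.
import Mathlib
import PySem

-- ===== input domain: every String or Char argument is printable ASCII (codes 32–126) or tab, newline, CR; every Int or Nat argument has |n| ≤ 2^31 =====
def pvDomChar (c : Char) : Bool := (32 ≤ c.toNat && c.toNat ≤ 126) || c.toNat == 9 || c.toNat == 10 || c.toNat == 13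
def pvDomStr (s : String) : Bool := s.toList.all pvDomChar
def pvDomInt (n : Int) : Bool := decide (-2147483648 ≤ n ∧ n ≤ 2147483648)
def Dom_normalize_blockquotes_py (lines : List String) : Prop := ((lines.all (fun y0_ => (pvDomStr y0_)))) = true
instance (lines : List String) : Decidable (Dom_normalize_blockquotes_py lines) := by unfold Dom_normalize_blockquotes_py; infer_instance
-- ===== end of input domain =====

-- B replaces A's per-line in_blockquote flag with an explicit traversal over maximal
-- quote/non-quote runs (objective: alternative decomposition, same cost).

-- shared tiny helper: Python's 'result and result[-1].strip()' truthiness test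
def pvLastTruthy (result : List String) : Bool :=
  match result.getLast? with
  | some l => PySem.Str.strip l != ""
  | none => false

-- ===== PORT A =====
def pvAStep (st : List String × Bool) (line : String) : List String × Bool :=
  let result := st.1
  let in_blockquote := st.2
  let stripped := PySem.Str.strip line
  if PySem.Str.startswith stripped ">" then
    let result := if !in_blockquote && pvLastTruthy result then result ++ [""] else result
    let content := PySem.Str.strip (PySem.Str.slice stripped (some 1) none)
    (result ++ ["> " ++ content], true)
  else
    let result := if in_blockquote && (stripped != "") then result ++ [""] else result
    (result ++ [line], false)

def normalize_blockquotes_py (lines : List String) : List String :=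
  (lines.foldl pvAStep ([], false)).1

-- ===== PORT B =====
def pvKey (line : String) : Bool := PySem.Str.startswith (PySem.Str.strip line) ">"

def pvEmitQuote (l : String) : String :=
  "> " ++ PySem.Str.strip (PySem.Str.slice (PySem.Str.strip l) (some 1) none)

def pvBLoop (out : List String) (prev : Bool) : List String → List String
  | [] => out
  | line :: rest =>
    let k := pvKey line
    let run := line :: rest.takeWhile (fun l => pvKey l == k)
    let rest' := rest.dropWhile (fun l => pvKey l == k)
    let out' :=
      if k then
        (if pvLastTruthy out then out ++ [""] else out) ++ run.map pvEmitQuote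
      else
        (if prev && (PySem.Str.strip line != "") then out ++ [""] else out) ++ run
    pvBLoop out' k rest'
termination_by l => l.length
decreasing_by
  simp only [List.length_cons]
  exact Nat.lt_succ_of_le (rest.length_dropWhile_le _)

def normalize_blockquotes_py_alt (lines : List String) : List String :=
  pvBLoop [] false lines

-- ===== PRECONDITION & SPEC =====
def Spec_normalize_blockquotes_py (lines : List String) (out : List String) : Prop := out = normalize_blockquotes_py_alt lines
instance (lines : List String) (out : List String) : Decidable (Spec_normalize_blockquotes_py lines out) := by unfold Spec_normalize_blockquotes_py; infer_instance

-- ===== CLAIM (what is proved, stated in full; the proofs are below) =====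
def Claim_equal_normalize_blockquotes_py : Prop := ∀ (lines : List String), Dom_normalize_blockquotes_py lines → Spec_normalize_blockquotes_py lines (normalize_blockquotes_py lines)

-- ===== LEMMAS AND PROOFS =====

-- head of dropWhile fails the predicate
theorem pv_dropWhile_head_false {α : Type} (p : α → Bool) (l : List α) (hd : α) (tl : List α)
    (h : l.dropWhile p = hd :: tl) : p hd = false := by
  induction l with
  | nil => simp [List.dropWhile] at h
  | cons x xs ih =>
    by_cases hp : p x = true
    · rw [List.dropWhile_cons_of_pos hp] at h; exact ih h
    · rw [List.dropWhile_cons_of_neg hp] at h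
      cases h; simpa using hp

-- A's fold over a run of quote lines, already inside a blockquote, appends the mapped run
theorem pv_afold_quote (run : List String) (h : ∀ l ∈ run, pvKey l = true) (r : List String) :
    run.foldl pvAStep (r, true) = (r ++ run.map pvEmitQuote, true) := by
  induction run generalizing r with
  | nil => simp
  | cons x xs ih =>
    have hx : pvKey x = true := h x (List.mem_cons_self ..)
    have hstep : pvAStep (r, true) x = (r ++ [pvEmitQuote x], true) := by
      simp [pvAStep, pvEmitQuote, pvKey] at hx ⊢
      simp [hx]
    rw [List.foldl_cons, hstep, ih (fun l hl => h l (List.mem_cons_of_mem _ hl))]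
    simp

-- A's fold over a run of non-quote lines, outside a blockquote, appends the run verbatim
theorem pv_afold_plain (run : List String) (h : ∀ l ∈ run, pvKey l = false) (r : List String) :
    run.foldl pvAStep (r, false) = (r ++ run, false) := by
  induction run generalizing r with
  | nil => simp
  | cons x xs ih =>
    have hx : pvKey x = false := h x (List.mem_cons_self ..)
    have hstep : pvAStep (r, false) x = (r ++ [x], false) := by
      simp [pvAStep, pvKey] at hx ⊢
      simp [hx]
    rw [List.foldl_cons, hstep, ih (fun l hl => h l (List.mem_cons_of_mem _ hl))]
    simp

theorem pv_main (n : Nat) : ∀ (lines : List String), lines.length ≤ n →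
    ∀ (r : List String) (prev : Bool),
    (∀ hd tl, lines = hd :: tl → prev = true → pvKey hd = false) →
    (lines.foldl pvAStep (r, prev)).1 = pvBLoop r prev lines := by
  induction n with
  | zero =>
    intro lines hlen r prev _
    have : lines = [] := List.eq_nil_of_length_eq_zero (Nat.le_zero.mp hlen)
    subst this; simp [pvBLoop]
  | succ m ih =>
    intro lines hlen r prev hinv
    cases lines with
    | nil => simp [pvBLoop]
    | cons line rest =>
      rw [pvBLoop]
      set k := pvKey line with hk
      have hsplit : rest = rest.takeWhile (fun l => pvKey l == k) ++
          rest.dropWhile (fun l => pvKey l == k) := (rest.takeWhile_append_dropWhile ..).symm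
      have htw : ∀ l ∈ rest.takeWhile (fun l => pvKey l == k), pvKey l = k := by
        intro l hl
        have := List.mem_takeWhile_imp hl
        simpa using this
    -- A's first step on `line`
      have hdrop_len : (rest.dropWhile (fun l => pvKey l == k)).length ≤ m := by
        have := rest.length_dropWhile_le (fun l => pvKey l == k)
        simp only [List.length_cons] at hlen
        omega
      have hinv' : ∀ hd tl, rest.dropWhile (fun l => pvKey l == k) = hd :: tl →
          k = true → pvKey hd = false := by
        intro hd tl hh hkk
        have := pv_dropWhile_head_false _ _ _ _ hh
        rw [hkk] at this
        simpa using this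
      by_cases hkt : k = true
      · -- quote run
        have hprev : prev = false := by
          by_contra hp
          have := hinv line rest rfl (by revert hp; cases prev <;> simp)
          rw [← hk, hkt] at this; exact absurd this (by simp)
        have hstep : pvAStep (r, prev) line =
            ((if pvLastTruthy r then r ++ [""] else r) ++ [pvEmitQuote line], true) := by
          have hx : PySem.Str.startswith (PySem.Str.strip line) ">" = true := by
            rw [← pvKey, ← hk, hkt]
          simp [PySem.Str.startswith, PySem.Str.strip] at hx
          simp [pvAStep, pvEmitQuote, PySem.Str.startswith, PySem.Str.strip, hx, hprev]
        rw [List.foldl_cons, hstep]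
        conv_lhs => rw [hsplit]
        rw [List.foldl_append, pv_afold_quote _ (by intro l hl; rw [htw l hl, hkt]) _]
        rw [ih _ hdrop_len _ _ (by intro hd tl hh hkk; exact hinv' hd tl hh (hkk ▸ hkt))]
        simp [hkt, List.append_assoc]
      · -- non-quote run
        have hkf : k = false := by revert hkt; cases k <;> simp
        have hstep : pvAStep (r, prev) line =
            ((if prev && (PySem.Str.strip line != "") then r ++ [""] else r) ++ [line], false) := by
          have hx : PySem.Str.startswith (PySem.Str.strip line) ">" = false := by
            rw [← pvKey, ← hk, hkf]
          simp [PySem.Str.startswith, PySem.Str.strip] at hx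
          simp [pvAStep, PySem.Str.startswith, PySem.Str.strip, hx]
        rw [List.foldl_cons, hstep]
        conv_lhs => rw [hsplit]
        rw [List.foldl_append, pv_afold_plain _ (by intro l hl; rw [htw l hl, hkf]) _]
        rw [ih _ hdrop_len _ _ (by intro hd tl hh hkk; simp at hkk)]
        simp [hkf, List.append_assoc]

-- ===== VERDICT (by name: the statement is the Claim_ definition above) =====
theorem normalize_blockquotes_py_spec : Claim_equal_normalize_blockquotes_py := by
  intro lines _
  unfold Spec_normalize_blockquotes_py normalize_blockquotes_py normalize_blockquotes_py_alt
  exact pv_main lines.length lines le_rfl [] false (by intro _ _ _ h; cases h)
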